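-- pv_equiv track=rewrite | github.com/unrealities/MTGA_Draft_17Lands | src/utils.py | detect_string
-- ===== SOURCE A (Python) =====
-- from typing import List
--
-- def detect_string(search_line: str, search_strings: List[str]) -> int:
--     """
--     Robustly identifies the start of a JSON block in an Arena log line.
--     Indifferent to underscores, spaces, or casing.
--     """
--     # FAST PATH 1: If there's no JSON payload, immediately skip
--     json_start = search_line.find("{")
--     if json_start == -1:
--         return -1
--
--     # FAST PATH 2: Exact substring match (Solves massive CPU freezing on huge logs)
--     for pattern in search_strings:
--         if pattern in search_line:
--             return json_start
--
--     # SLOW PATH: Fallback to heavily sanitized matching if WOTC changed formatting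
--     norm_line = search_line.upper().replace("_", "").replace(" ", "")
--     for pattern in search_strings:
--         norm_pattern = pattern.upper().replace("_", "").replace(" ", "")
--         if norm_pattern in norm_line:
--             return json_start
--
--     return -1
-- ===== SOURCE B (Python) =====
-- from typing import List
--
-- def detect_string(search_line: str, search_strings: List[str]) -> int:
--     # Direct matcher: instead of building a normalized copy of the line and calling
--     # substring containment, scan the raw line with two cursors, skipping '_' and ' '
--     # and comparing case-insensitively on the fly.
--     json_start = search_line.find("{")
--     if json_start == -1:
--         return -1
--     n = len(search_line)
--     for pattern in search_strings:
--         pat = [c.upper() for c in pattern if c != '_' and c != ' ']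
--         m = len(pat)
--         for start in range(n + 1):
--             i, j = start, 0
--             ok = True
--             while j < m:
--                 if i >= n:
--                     ok = False
--                     break
--                 c = search_line[i]
--                 if c == '_' or c == ' ':
--                     i += 1
--                 elif c.upper() == pat[j]:
--                     i += 1
--                     j += 1
--                 else:
--                     ok = False
--                     break
--             if ok:
--                 return json_start
--     return -1
-- ===== Notes on version B (the rewrite author's own statement) =====
-- stated objective: alternative
-- what changed: Replaces A's two staged scans (exact substring pass, then normalize-both-sides-and-use-'in' pass) with a single direct two-cursor matcher that walks the raw line, skips '_' and ' ' and compares characters case-insensitively on the fly, never building a normalized copy of the line; correct because skipping ignorable characters while matching is exactly substring search in the normalized strings, and an exact match always survives normalization.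
import Mathlib
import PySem

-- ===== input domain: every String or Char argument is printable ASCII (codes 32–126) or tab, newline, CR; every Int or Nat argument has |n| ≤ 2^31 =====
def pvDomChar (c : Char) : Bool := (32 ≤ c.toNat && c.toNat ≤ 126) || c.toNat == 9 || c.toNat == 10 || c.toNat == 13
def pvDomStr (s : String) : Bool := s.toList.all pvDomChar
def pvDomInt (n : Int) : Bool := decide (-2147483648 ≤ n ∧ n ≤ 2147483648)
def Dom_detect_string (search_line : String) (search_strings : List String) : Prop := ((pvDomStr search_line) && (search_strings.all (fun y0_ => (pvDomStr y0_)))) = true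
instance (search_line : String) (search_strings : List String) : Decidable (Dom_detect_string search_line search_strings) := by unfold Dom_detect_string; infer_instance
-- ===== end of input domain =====

-- B replaces A's two staged scans (exact substring pass, then normalize-and-'in' pass)
-- with one direct two-cursor matcher over the raw line that skips '_'/' ' and compares
-- case-insensitively on the fly, never building a normalized line (objective: alternative).


-- ===== PORT A =====
-- 'for pattern in search_strings: if pattern in search_line: return json_start'
def dsLoopExact (search_line : String) (json_start : Int) : List String → Option Int
  | [] => none
  | pattern :: rest =>
    if PySem.Str.isIn pattern search_line then some json_start
    else dsLoopExact search_line json_start rest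

-- 'for pattern in search_strings: norm_pattern = …; if norm_pattern in norm_line: return json_start'
def dsLoopNorm (norm_line : String) (json_start : Int) : List String → Option Int
  | [] => none
  | pattern :: rest =>
    let norm_pattern := PySem.Str.replace (PySem.Str.replace (PySem.Str.upper pattern) "_" "") " " ""
    if PySem.Str.isIn norm_pattern norm_line then some json_start
    else dsLoopNorm norm_line json_start rest

def detect_string (search_line : String) (search_strings : List String) : Int :=
  let json_start := PySem.Str.find search_line "{"
  if json_start = -1 then -1
  else
    match dsLoopExact search_line json_start search_strings with
    | some r => r
    | none =>
      let norm_line := PySem.Str.replace (PySem.Str.replace (PySem.Str.upper search_line) "_" "") " " ""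
      match dsLoopNorm norm_line json_start search_strings with
      | some r => r
      | none => -1

-- ===== PORT B =====
-- "c != '_' and c != ' '" — the comprehension's filter
def dsKeep (c : Char) : Bool := !(c == '_' || c == ' ')

-- the inner 'while j < m' loop of Source B: cursors i (line) and j (pattern) become the
-- remaining suffixes; skip '_'/' ' in the line, otherwise compare uppercased chars
def dsMatchHere : List Char → List Char → Bool
  | _, [] => true
  | [], _ :: _ => false
  | c :: cs, p :: ps =>
    if c == '_' || c == ' ' then dsMatchHere cs (p :: ps)
    else if PySem.Chars.upperChar c == p then dsMatchHere cs ps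
    else false

-- 'for start in range(n + 1)': try the matcher at every suffix of the line (incl. empty)
def dsSearch (pat : List Char) : List Char → Bool
  | [] => dsMatchHere [] pat
  | c :: t => dsMatchHere (c :: t) pat || dsSearch pat t

-- 'for pattern in search_strings: pat = [c.upper() for c in pattern if …]; …'
def dsPatLoopB (line : List Char) (json_start : Int) : List String → Option Int
  | [] => none
  | pattern :: rest =>
    let pat := (pattern.toList.filter dsKeep).map PySem.Chars.upperChar
    if dsSearch pat line then some json_start else dsPatLoopB line json_start rest

def detect_string_alt (search_line : String) (search_strings : List String) : Int :=
  let json_start := PySem.Str.find search_line "{"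
  if json_start = -1 then -1
  else
    match dsPatLoopB search_line.toList json_start search_strings with
    | some r => r
    | none => -1

-- ===== PRECONDITION & SPEC =====
def Spec_detect_string (search_line : String) (search_strings : List String) (out : Int) : Prop := out = detect_string_alt search_line search_strings
instance (search_line : String) (search_strings : List String) (out : Int) : Decidable (Spec_detect_string search_line search_strings out) := by unfold Spec_detect_string; infer_instance

-- ===== CLAIM (what is proved, stated in full; the proofs are below) =====
def Claim_equal_detect_string : Prop := ∀ (search_line : String) (search_strings : List String), Dom_detect_string search_line search_strings → Spec_detect_string search_line search_strings (detect_string search_line search_strings)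

-- ===== LEMMAS AND PROOFS =====

-- replace s [c] "" deletes every occurrence of the single character c
theorem replace_go_single (c₀ : Char) :
    ∀ (l acc : List Char) (fuel : Nat), l.length ≤ fuel →
      PySem.Chars.replace.go [c₀] [] fuel l acc
        = acc.reverse ++ l.filter (fun c => decide (c ≠ c₀)) := by
  intro l
  induction l with
  | nil =>
    intro acc fuel _
    cases fuel <;> simp [PySem.Chars.replace.go]
  | cons c t ih =>
    intro acc fuel hf
    cases fuel with
    | zero => simp at hf
    | succ f =>
      rw [PySem.Chars.replace.go]
      by_cases hc : c₀ = c
      · subst hc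
        have hpre : ([c₀].isPrefixOf (c₀ :: t)) = true := by simp [List.isPrefixOf]
        rw [if_pos hpre]
        have hd : List.drop [c₀].length (c₀ :: t) = t := rfl
        have ha : ([] : List Char).reverse ++ acc = acc := rfl
        rw [hd, ha, ih acc f (by simpa using hf)]
        simp
      · have hpre : ([c₀].isPrefixOf (c :: t)) = false := by
          simp [List.isPrefixOf, hc]
        rw [if_neg (by rw [hpre]; exact Bool.false_ne_true)]
        rw [ih (c :: acc) f (by simpa using hf)]
        simp [Ne.symm hc]

theorem replace_single (c₀ : Char) (s : List Char) :
    PySem.Chars.replace s [c₀] [] = s.filter (fun c => decide (c ≠ c₀)) := by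
  rw [PySem.Chars.replace]
  simp [replace_go_single c₀ s [] s.length le_rfl]

-- the normalization of A's slow path, on the List Char side
def normL (cs : List Char) : List Char :=
  ((cs.map PySem.Chars.upperChar).filter (fun c => decide (c ≠ '_'))).filter
    (fun c => decide (c ≠ ' '))

def pyNorm (s : String) : String :=
  PySem.Str.replace (PySem.Str.replace (PySem.Str.upper s) "_" "") " " ""

theorem toList_pyNorm (s : String) : (pyNorm s).toList = normL s.toList := by
  unfold pyNorm normL
  rw [PySem.Str.toList_replace, PySem.Str.toList_replace, PySem.Str.toList_upper]
  rw [show ("_" : String).toList = ['_'] from rfl,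
    show (" " : String).toList = [' '] from rfl,
    show ("" : String).toList = [] from rfl,
    replace_single, replace_single, PySem.Chars.upper]

theorem normL_append (a b : List Char) : normL (a ++ b) = normL a ++ normL b := by
  simp [normL, List.filter_append]

theorem normL_infix {p s : List Char} (h : p <:+: s) : normL p <:+: normL s := by
  obtain ⟨x, y, rfl⟩ := h
  exact ⟨normL x, normL y, by rw [← normL_append, ← normL_append]⟩

-- an exact substring match survives normalization
theorem isIn_pyNorm_of_isIn {p s : String} (h : PySem.Str.isIn p s = true) :
    PySem.Str.isIn (pyNorm p) (pyNorm s) = true := by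
  rw [PySem.Str.isIn_iff_infix] at h ⊢
  rw [toList_pyNorm, toList_pyNorm]
  exact normL_infix h

theorem dsLoopExact_eq (sl : String) (js : Int) (ss : List String) :
    dsLoopExact sl js ss
      = if ss.any (fun p => PySem.Str.isIn p sl) then some js else none := by
  induction ss with
  | nil => rfl
  | cons p rest ih =>
    rw [dsLoopExact, ih]
    cases hp : PySem.Str.isIn p sl with
    | true => simp only [List.any_cons, hp, Bool.true_or, if_pos]
    | false => simp only [List.any_cons, hp, Bool.false_or, if_false, Bool.false_eq_true]

theorem dsLoopNorm_eq (nl : String) (js : Int) (ss : List String) :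
    dsLoopNorm nl js ss
      = if ss.any (fun p => PySem.Str.isIn (pyNorm p) nl) then some js else none := by
  induction ss with
  | nil => rfl
  | cons p rest ih =>
    rw [dsLoopNorm]
    show (if PySem.Str.isIn (pyNorm p) nl then some js else dsLoopNorm nl js rest) = _
    rw [ih]
    cases hp : PySem.Str.isIn (pyNorm p) nl with
    | true => simp only [List.any_cons, hp, Bool.true_or, if_pos]
    | false => simp only [List.any_cons, hp, Bool.false_or, if_false, Bool.false_eq_true]

-- ---- B-side characterisation ----

-- uppercasing never creates or destroys '_' or ' '
theorem dsKeep_upperChar (c : Char) : dsKeep (PySem.Chars.upperChar c) = dsKeep c := by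
  unfold PySem.Chars.upperChar PySem.Chars.islower
  by_cases h : ('a' ≤ c ∧ c ≤ 'z')
  · have h1 : 97 ≤ c.toNat := h.1
    have h2 : c.toNat ≤ 122 := h.2
    have hv : (c.toNat - 32).isValidChar := by constructor; omega
    have ht : (Char.ofNat (c.toNat - 32)).toNat = c.toNat - 32 := by
      rw [Char.ofNat, dif_pos hv, Char.ofNatAux]
      show (UInt32.ofNatLT _ _).toNat = _
      rw [UInt32.toNat_ofNatLT]
    have hcond : (decide ('a' ≤ c) && decide (c ≤ 'z')) = true := by simp [h.1, h.2]
    rw [if_pos hcond]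
    unfold dsKeep
    have e1 : (Char.ofNat (c.toNat - 32) == '_') = false := by
      simp only [beq_eq_false_iff_ne]; intro he
      rw [he] at ht
      have h95 : ('_' : Char).toNat = 95 := rfl
      omega
    have e2 : (Char.ofNat (c.toNat - 32) == ' ') = false := by
      simp only [beq_eq_false_iff_ne]; intro he
      rw [he] at ht
      have h32 : (' ' : Char).toNat = 32 := rfl
      omega
    have e3 : (c == '_') = false := by
      simp only [beq_eq_false_iff_ne]; intro he
      have : c.toNat = 95 := by rw [he]; rfl
      omega
    have e4 : (c == ' ') = false := by
      simp only [beq_eq_false_iff_ne]; intro he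
      have : c.toNat = 32 := by rw [he]; rfl
      omega
    rw [e1, e2, e3, e4]
  · have hcond : ¬ ((decide ('a' ≤ c) && decide (c ≤ 'z')) = true) := by
      simp only [Bool.and_eq_true, decide_eq_true_eq]; exact h
    rw [if_neg hcond]

-- decide-form vs beq-form of the keep predicate
theorem keep_eq (x : Char) : (decide (x ≠ ' ') && decide (x ≠ '_')) = dsKeep x := by
  unfold dsKeep
  by_cases a : x = '_' <;> by_cases b : x = ' ' <;> simp [a, b]

-- A's normalization equals B's filter-then-uppercase
theorem normL_eq_filter_map (cs : List Char) :
    normL cs = (cs.filter dsKeep).map PySem.Chars.upperChar := by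
  unfold normL
  rw [List.filter_filter, List.filter_map]
  congr 1
  apply List.filter_congr
  intro c _
  show (decide (PySem.Chars.upperChar c ≠ ' ') && decide (PySem.Chars.upperChar c ≠ '_')) = dsKeep c
  rw [keep_eq, dsKeep_upperChar]

-- the two-cursor matcher succeeds iff the cleaned pattern is a prefix of the cleaned line
theorem dsMatchHere_iff (cs : List Char) :
    ∀ pat, dsMatchHere cs pat = true ↔ pat <+: (cs.filter dsKeep).map PySem.Chars.upperChar := by
  induction cs with
  | nil =>
    intro pat
    cases pat with
    | nil => simp [dsMatchHere]
    | cons p ps => simp [dsMatchHere]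
  | cons c t ih =>
    intro pat
    cases pat with
    | nil => simp [dsMatchHere]
    | cons p ps =>
      rw [dsMatchHere]
      by_cases hk : (c == '_' || c == ' ') = true
      · have : dsKeep c = false := by unfold dsKeep; rw [hk]; rfl
        rw [if_pos hk, List.filter_cons_of_neg (by simp [this])]
        exact ih (p :: ps)
      · have : dsKeep c = true := by
          unfold dsKeep
          rw [Bool.not_eq_true] at hk
          rw [hk]; rfl
        rw [if_neg hk, List.filter_cons_of_pos this, List.map_cons]
        by_cases hp : (PySem.Chars.upperChar c == p) = true
        · rw [if_pos hp, ih ps]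
          rw [beq_iff_eq] at hp
          subst hp
          constructor
          · intro h; exact List.cons_prefix_cons.mpr ⟨rfl, h⟩
          · intro h; exact (List.cons_prefix_cons.mp h).2
        · rw [if_neg hp]
          simp only [Bool.false_eq_true, false_iff]
          intro h
          exact hp (beq_iff_eq.mpr (List.cons_prefix_cons.mp h).1.symm)

-- the outer start loop succeeds iff some suffix of the line matches
theorem dsSearch_iff (pat : List Char) (cs : List Char) :
    dsSearch pat cs = true ↔ ∃ t, t <:+ cs ∧ dsMatchHere t pat = true := by
  induction cs with
  | nil =>
    rw [dsSearch]
    constructor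
    · intro h; exact ⟨[], List.suffix_rfl, h⟩
    · rintro ⟨t, ht, hm⟩
      rw [List.suffix_nil.mp ht] at hm; exact hm
  | cons c t ih =>
    rw [dsSearch, Bool.or_eq_true, ih]
    constructor
    · rintro (h | ⟨u, hu, hm⟩)
      · exact ⟨c :: t, List.suffix_rfl, h⟩
      · exact ⟨u, hu.trans (List.suffix_cons c t), hm⟩
    · rintro ⟨u, hu, hm⟩
      rcases List.suffix_cons_iff.mp hu with h | h
      · subst h; exact Or.inl hm
      · exact Or.inr ⟨u, h, hm⟩

-- every suffix of the cleaned line is the cleaning of a suffix of the line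
theorem suffix_normL_surj {S : List Char} :
    ∀ {cs : List Char}, S <:+ normL cs → ∃ t, t <:+ cs ∧ normL t = S := by
  intro cs
  induction cs with
  | nil =>
    intro h
    refine ⟨[], List.suffix_rfl, ?_⟩
    simpa [normL] using (List.suffix_nil.mp (by simpa [normL] using h))
  | cons c t ih =>
    intro h
    rw [show c :: t = [c] ++ t from rfl, normL_append] at h
    rcases (show normL [c] = [] ∨ normL [c] = [PySem.Chars.upperChar c] from by
        unfold normL
        by_cases a : PySem.Chars.upperChar c = '_' <;>
          by_cases b : PySem.Chars.upperChar c = ' ' <;> simp [a, b]) with hd | hd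
    · rw [hd, List.nil_append] at h
      obtain ⟨u, hu, rfl⟩ := ih h
      exact ⟨u, hu.trans (List.suffix_cons c t), rfl⟩
    · rw [hd] at h
      rcases List.suffix_cons_iff.mp h with h | h
      · refine ⟨c :: t, List.suffix_rfl, ?_⟩
        rw [show c :: t = [c] ++ t from rfl, normL_append, hd]
        simp [h]
      · obtain ⟨u, hu, rfl⟩ := ih h
        exact ⟨u, hu.trans (List.suffix_cons c t), rfl⟩

theorem normL_suffix {t cs : List Char} (h : t <:+ cs) : normL t <:+ normL cs := by
  obtain ⟨x, rfl⟩ := h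
  exact ⟨normL x, (normL_append x t).symm⟩

-- B's matcher decides exactly normalized containment
theorem dsSearch_eq_isIn (p sl : String) :
    dsSearch ((p.toList.filter dsKeep).map PySem.Chars.upperChar) sl.toList
      = PySem.Str.isIn (pyNorm p) (pyNorm sl) := by
  have hiff :
      dsSearch ((p.toList.filter dsKeep).map PySem.Chars.upperChar) sl.toList = true
        ↔ PySem.Str.isIn (pyNorm p) (pyNorm sl) = true := by
    rw [PySem.Str.isIn_iff_infix, toList_pyNorm, toList_pyNorm, dsSearch_iff]
    constructor
    · rintro ⟨t, ht, hm⟩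
      rw [dsMatchHere_iff, ← normL_eq_filter_map p.toList, ← normL_eq_filter_map t] at hm
      exact List.infix_iff_prefix_suffix.mpr ⟨normL t, hm, normL_suffix ht⟩
    · intro h
      obtain ⟨S, hpre, hsuf⟩ := List.infix_iff_prefix_suffix.mp h
      obtain ⟨t, ht, rfl⟩ := suffix_normL_surj hsuf
      refine ⟨t, ht, ?_⟩
      rw [dsMatchHere_iff, ← normL_eq_filter_map p.toList, ← normL_eq_filter_map t]
      exact hpre
  cases h1 : dsSearch ((p.toList.filter dsKeep).map PySem.Chars.upperChar) sl.toList <;>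
    cases h2 : PySem.Str.isIn (pyNorm p) (pyNorm sl) <;> simp_all

theorem dsPatLoopB_eq (sl : String) (js : Int) (ss : List String) :
    dsPatLoopB sl.toList js ss
      = if ss.any (fun p => PySem.Str.isIn (pyNorm p) (pyNorm sl)) then some js else none := by
  induction ss with
  | nil => rfl
  | cons p rest ih =>
    rw [dsPatLoopB]
    show (if dsSearch ((p.toList.filter dsKeep).map PySem.Chars.upperChar) sl.toList
            then some js else dsPatLoopB sl.toList js rest) = _
    rw [dsSearch_eq_isIn, ih]
    cases hp : PySem.Str.isIn (pyNorm p) (pyNorm sl) with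
    | true => simp only [List.any_cons, hp, Bool.true_or, if_pos]
    | false => simp only [List.any_cons, hp, Bool.false_or, if_false, Bool.false_eq_true]

-- ===== VERDICT (by name: the statement is the Claim_ definition above) =====
theorem detect_string_spec : Claim_equal_detect_string := by
  intro sl ss _
  unfold Spec_detect_string detect_string detect_string_alt
  by_cases hjs : PySem.Str.find sl "{" = -1
  · rw [if_pos hjs, if_pos hjs]
  · rw [if_neg hjs, if_neg hjs]
    have hnl : PySem.Str.replace (PySem.Str.replace (PySem.Str.upper sl) "_" "") " " ""
        = pyNorm sl := rfl
    rw [dsLoopExact_eq, dsPatLoopB_eq]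
    simp only [hnl, dsLoopNorm_eq]
    by_cases hAny : ss.any (fun p => PySem.Str.isIn (pyNorm p) (pyNorm sl)) = true
    · by_cases hEx : ss.any (fun p => PySem.Str.isIn p sl) = true
      · simp only [if_pos hAny, if_pos hEx]
      · simp only [if_neg hEx, if_pos hAny]
    · have hEx : ¬ ss.any (fun p => PySem.Str.isIn p sl) = true := by
        intro h
        apply hAny
        rw [List.any_eq_true] at h ⊢
        obtain ⟨p, hp, hin⟩ := h
        exact ⟨p, hp, isIn_pyNorm_of_isIn hin⟩
      simp only [if_neg hEx, if_neg hAny]
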